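-- pv_equiv track=rewrite | github.com/pypi-data/pypi-mirror-93 | packages/pyNlple/pyNlple-0.7.2.tar.gz/pyNlple-0.7.2/pynlple/processing/mention.py | __find_local_index
-- ===== SOURCE A (Python) =====
-- def __find_local_index(parts, abs_index):
--     cur_index = 0
--     for i, part in enumerate(parts):
--         part_len = len(part)
--         upd_index = cur_index + part_len
--         if upd_index > abs_index:
--             return i, abs_index - cur_index
--         cur_index = upd_index
--     return len(parts), 0
-- ===== SOURCE B (Python) =====
-- def __find_local_index(parts, abs_index):
--     # Build the cumulative prefix-length table once.
--     cum = []
--     total = 0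
--     for part in parts:
--         total += len(part)
--         cum.append(total)
--     # Binary search (bisect_right): lo ends as the first index with cum[lo] > abs_index.
--     lo, hi = 0, len(cum)
--     while lo < hi:
--         mid = (lo + hi) // 2
--         if abs_index < cum[mid]:
--             hi = mid
--         else:
--             lo = mid + 1
--     if lo == len(parts):
--         return len(parts), 0
--     return lo, abs_index - (cum[lo - 1] if lo > 0 else 0)
-- ===== Notes on version B (the rewrite author's own statement) =====
-- stated objective: alternative
-- what changed: Replaces the running-sum scan with a build-once cumulative prefix-length table located afterwards by a bisect_right binary search - a different data representation and traversal of the parts, at similar cost.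
import Mathlib
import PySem

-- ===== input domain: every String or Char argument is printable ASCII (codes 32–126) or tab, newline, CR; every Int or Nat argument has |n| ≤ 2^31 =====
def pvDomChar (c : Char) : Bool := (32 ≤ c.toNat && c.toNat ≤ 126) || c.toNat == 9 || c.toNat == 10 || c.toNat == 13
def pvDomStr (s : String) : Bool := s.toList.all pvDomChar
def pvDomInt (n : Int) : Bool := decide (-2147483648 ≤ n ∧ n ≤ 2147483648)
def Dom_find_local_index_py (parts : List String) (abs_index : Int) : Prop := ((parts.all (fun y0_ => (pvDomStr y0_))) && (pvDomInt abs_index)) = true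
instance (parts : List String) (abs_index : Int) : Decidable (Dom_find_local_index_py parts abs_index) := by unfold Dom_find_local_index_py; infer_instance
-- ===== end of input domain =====

-- B replaces A's running-sum scan by a prefix-length table plus a bisect_right binary search
-- (a different data representation and traversal at similar cost).

-- ===== PORT A =====
-- the enumerate loop; i carries the enumerate counter, so at loop exit i = len(parts)
-- and the final return (len(parts), 0) is (i, 0)
def findA_go (abs_index : Int) : List String → Int → Int → Int × Int
  | [], i, _cur_index => (i, 0)
  | part :: ps, i, cur_index =>
      let part_len := PySem.Str.len part
      let upd_index := cur_index + part_len
      if upd_index > abs_index then (i, abs_index - cur_index)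
      else findA_go abs_index ps (i + 1) upd_index

def find_local_index_py (parts : List String) (abs_index : Int) : Int × Int :=
  findA_go abs_index parts 0 0

-- ===== PORT B =====
-- Source B's first loop: build the cumulative prefix-length table
def cumTable (parts : List String) : List Int :=
  (parts.foldl (fun (acc : List Int × Int) part =>
      let total := acc.2 + PySem.Str.len part
      (acc.1 ++ [total], total)) ([], 0)).1

-- Source B's hand-written lo/hi halving loop is exactly Python's bisect_right;
-- it is ported as the PySem primitive for bisect_right (the same binary-search loop).
def find_local_index_py_alt (parts : List String) (abs_index : Int) : Int × Int :=
  let cum := cumTable parts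
  let lo := PySem.List.bisectRight cum abs_index
  if lo = parts.length then ((parts.length : Int), 0)
  else ((lo : Int), abs_index - (if 0 < lo then cum.getD (lo - 1) 0 else 0))

-- ===== PRECONDITION & SPEC =====
def Spec_find_local_index_py (parts : List String) (abs_index : Int) (out : Int × Int) : Prop := out = find_local_index_py_alt parts abs_index
instance (parts : List String) (abs_index : Int) (out : Int × Int) : Decidable (Spec_find_local_index_py parts abs_index out) := by unfold Spec_find_local_index_py; infer_instance

-- ===== CLAIM (what is proved, stated in full; the proofs are below) =====
def Claim_equal_find_local_index_py : Prop := ∀ (parts : List String) (abs_index : Int), Dom_find_local_index_py parts abs_index → Spec_find_local_index_py parts abs_index (find_local_index_py parts abs_index)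

-- ===== LEMMAS AND PROOFS =====

-- prefix sum of the first n part lengths
def pfx (parts : List String) (n : Nat) : Int :=
  ((parts.map PySem.Str.len).take n).sum

theorem pfx_zero (parts : List String) : pfx parts 0 = 0 := by simp [pfx]

theorem pfx_succ (parts : List String) (i : Nat) (h : i < parts.length) :
    pfx parts (i + 1) = pfx parts i + PySem.Str.len parts[i] := by
  unfold pfx
  rw [List.sum_take_succ (parts.map PySem.Str.len) i (by simpa using h)]
  simp

theorem pfx_succ_cons (p : String) (ps : List String) (n : Nat) :
    pfx (p :: ps) (n + 1) = PySem.Str.len p + pfx ps n := by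
  simp [pfx]

theorem pfx_le_succ (parts : List String) (n : Nat) : pfx parts n ≤ pfx parts (n + 1) := by
  by_cases h : n < parts.length
  · rw [pfx_succ parts n h]
    have : (0 : Int) ≤ PySem.Str.len parts[n] := by
      rw [PySem.Str.len_eq]; positivity
    omega
  · unfold pfx
    rw [List.take_of_length_le (by simpa using Nat.le_of_not_lt h),
        List.take_of_length_le (by simp; omega)]

theorem pfx_mono (parts : List String) : Monotone (pfx parts) :=
  monotone_nat_of_le_succ (pfx_le_succ parts)

theorem cumTable_eq (parts : List String) :
    cumTable parts = (List.range parts.length).map (fun k => pfx parts (k + 1)) := by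
  have key : ∀ (ps : List String) (acc : List Int) (t : Int),
      ps.foldl (fun (acc : List Int × Int) part =>
        let total := acc.2 + PySem.Str.len part
        (acc.1 ++ [total], total)) (acc, t)
      = (acc ++ (List.range ps.length).map (fun k => t + pfx ps (k + 1)),
         t + pfx ps ps.length) := by
    intro ps
    induction ps with
    | nil => intro acc t; simp [pfx_zero]
    | cons p ps ih =>
        intro acc t
        simp only [List.foldl_cons]
        rw [ih (acc ++ [t + PySem.Str.len p]) (t + PySem.Str.len p)]
        simp only [List.length_cons, List.range_succ_eq_map, List.map_cons, List.map_map]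
        simp only [Prod.mk.injEq]
        refine ⟨?_, by rw [pfx_succ_cons]; ring⟩
        rw [List.append_assoc]
        congr 1
        rw [pfx_succ_cons, pfx_zero, List.singleton_append]
        congr 1
        all_goals
          refine List.map_congr_left (fun a _ => ?_)
          simp only [Function.comp_def, Nat.succ_eq_add_one]
          rw [pfx_succ_cons]
          ring
  rw [cumTable, key]
  simp

theorem cumTable_length (parts : List String) :
    (cumTable parts).length = parts.length := by
  rw [cumTable_eq]; simp

theorem cumTable_get (parts : List String) (k : Nat) (h : k < parts.length) :
    (cumTable parts)[k]'(by rw [cumTable_length]; exact h) = pfx parts (k + 1) := by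
  simp [cumTable_eq]

theorem cumTable_sorted (parts : List String) :
    List.Pairwise (fun x1 x2 => x1 ≤ x2) (cumTable parts) := by
  rw [List.pairwise_iff_getElem]
  intro i j hi hj hij
  rw [cumTable_length] at hi hj
  rw [cumTable_get parts i hi, cumTable_get parts j hj]
  exact pfx_mono parts (by omega)

theorem main_lemma (abs_index : Int) (parts : List String) :
    ∀ (ps : List String) (i : Nat), ps = parts.drop i → i ≤ parts.length →
    (∀ j : Nat, j < i → pfx parts (j + 1) ≤ abs_index) →
    findA_go abs_index ps (i : Int) (pfx parts i) = find_local_index_py_alt parts abs_index := by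
  have spec := PySem.List.bisectRight_spec (cumTable parts) abs_index (cumTable_sorted parts)
  set r := PySem.List.bisectRight (cumTable parts) abs_index with hr
  obtain ⟨hrle, hbelow, habove⟩ := spec
  rw [cumTable_length] at hrle
  intro ps
  induction ps with
  | nil =>
      intro i hdrop hile hpassed
      have hlen : i = parts.length := by
        have := congrArg List.length hdrop
        simp at this
        omega
      have hrall : r = parts.length := by
        by_contra hne
        have hrlt : r < parts.length := by omega
        have h1 := habove r (by rw [cumTable_length]; exact hrlt) (le_refl r)
        rw [cumTable_get parts r hrlt] at h1
        have h2 := hpassed r (by omega)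
        omega
      simp only [findA_go, find_local_index_py_alt]
      rw [← hr, hrall]
      simp [hlen]
  | cons part ps ih =>
      intro i hdrop hile hpassed
      have hi : i < parts.length := by
        by_contra h
        rw [List.drop_of_length_le (by omega)] at hdrop
        simp at hdrop
      have hcons := List.drop_eq_getElem_cons hi
      rw [hcons] at hdrop
      rw [List.cons.injEq] at hdrop
      obtain ⟨hpart, hps⟩ := hdrop
      have hupd : pfx parts i + PySem.Str.len part = pfx parts (i + 1) := by
        rw [hpart, pfx_succ parts i hi]
      simp only [findA_go]
      rw [hupd]
      by_cases hgt : pfx parts (i + 1) > abs_index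
      · rw [if_pos hgt]
        -- here r = i
        have hri : r = i := by
          rcases Nat.lt_trichotomy r i with h | h | h
          · have h1 := habove r (by rw [cumTable_length]; omega) (le_refl r)
            rw [cumTable_get parts r (by omega)] at h1
            have h2 := hpassed r (by omega)
            omega
          · exact h
          · have h1 := hbelow i (by rw [cumTable_length]; exact hi) h
            rw [cumTable_get parts i hi] at h1
            omega
        simp only [find_local_index_py_alt]
        rw [← hr, hri, if_neg (by omega)]
        congr 1
        by_cases hz : 0 < i
        · rw [if_pos hz]
          rw [List.getD_eq_getElem (cumTable parts) 0 (by rw [cumTable_length]; omega)]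
          rw [cumTable_get parts (i - 1) (by omega)]
          have : i - 1 + 1 = i := by omega
          rw [this]
        · rw [if_neg hz]
          have : i = 0 := by omega
          rw [this, pfx_zero]
      · rw [if_neg hgt]
        have step : ((i : Int) + 1) = ((i + 1 : Nat) : Int) := by push_cast; ring
        rw [step]
        exact ih (i + 1) hps (by omega)
          (fun j hj => by
            rcases Nat.lt_or_ge j i with h | h
            · exact hpassed j h
            · have : j = i := by omega
              rw [this]; omega)

-- ===== VERDICT (by name: the statement is the Claim_ definition above) =====
theorem find_local_index_py_spec : Claim_equal_find_local_index_py := by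
  intro parts abs_index _hdom
  unfold Spec_find_local_index_py find_local_index_py
  have := main_lemma abs_index parts parts 0 (by simp) (by omega) (by omega)
  rw [pfx_zero] at this
  simpa using this
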